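-- pv_equiv track=rewrite | github.com/Fondamenti18/fondamenti-di-programmazione | students/761660/homework01/program03.py | trovachiave
-- ===== SOURCE A (Python) =====
-- def trovachiave(chiave):
--     '''Data una stringa la trasforma in una sequenza disordinata'''
--     chiave1=[]
--     for c in chiave:
--         if(c>='a' and c<='z'):
--             chiave1+=[c]
--         for c in chiave1:
--             if chiave1.count(c)>1:
--                 chiave1.remove(c)
--     return chiave1
-- ===== SOURCE B (Python) =====
-- def trovachiave(chiave):
--     '''Data una stringa la trasforma in una sequenza disordinata'''
--     seen = set()
--     out = []
--     for c in reversed(chiave):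
--         if 'a' <= c <= 'z' and c not in seen:
--             seen.add(c)
--             out.append(c)
--     out.reverse()
--     return out
-- ===== Notes on version B (the rewrite author's own statement) =====
-- stated objective: faster
-- what changed: A repeatedly appends and then rescans the whole list removing duplicates in place (nested count/remove passes); B makes a single pass over the reversed string keeping the first not-yet-seen lowercase char with a seen-set and reverses the output.
import Mathlib
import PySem

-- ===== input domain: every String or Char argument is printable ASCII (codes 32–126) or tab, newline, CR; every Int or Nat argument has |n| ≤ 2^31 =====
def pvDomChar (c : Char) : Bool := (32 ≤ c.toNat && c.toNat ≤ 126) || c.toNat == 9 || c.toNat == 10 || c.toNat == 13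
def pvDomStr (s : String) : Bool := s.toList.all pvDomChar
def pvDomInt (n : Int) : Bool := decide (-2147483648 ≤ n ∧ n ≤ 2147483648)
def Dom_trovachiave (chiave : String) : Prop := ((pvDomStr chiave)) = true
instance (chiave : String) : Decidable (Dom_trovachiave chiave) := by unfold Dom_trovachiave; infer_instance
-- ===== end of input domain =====

-- B replaces A's quadratic append-then-scan-and-remove duplicate elimination by a single
-- reversed pass with a seen-set (keep first occurrence of the reversed string, then reverse).


-- ===== PORT A =====
-- Python's inner `for c in chiave1: if chiave1.count(c)>1: chiave1.remove(c)`: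
-- index-based iteration over the mutating list (after a removal the cursor still advances,
-- skipping one element, exactly as CPython does).  `count(c) > 1` guarantees membership,
-- so `list.remove(c)` is exactly `List.erase` (remove the first occurrence).
def pvDedupLoop (lst : List Char) (i : Nat) : List Char :=
  if h : i < lst.length then
    if lst.count lst[i] > 1 then
      pvDedupLoop (lst.erase lst[i]) (i + 1)
    else
      pvDedupLoop lst (i + 1)
  else lst
termination_by lst.length - i
decreasing_by
  · have hm : lst[i] ∈ lst := by exact List.getElem_mem h
    have := List.length_erase_add_one hm
    omega
  · omega

-- the outer `for c in chiave:` loop of A, carrying chiave1 as accumulator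
def pvALoop (acc : List Char) (cs : List Char) : List Char :=
  match cs with
  | [] => acc
  | c :: rest =>
      pvALoop (pvDedupLoop (if 'a' ≤ c ∧ c ≤ 'z' then acc ++ [c] else acc) 0) rest

def trovachiave (chiave : String) : List String :=
  (pvALoop [] chiave.toList).map (fun c => String.ofList [c])

-- ===== PORT B =====
-- Source B: scan reversed(chiave) keeping the first occurrence not yet seen, then reverse the output
def pvBLoop (cs : List Char) (seen : PySem.Set Char) (out : List Char) : List Char :=
  match cs with
  | [] => out
  | c :: rest =>
      if ('a' ≤ c ∧ c ≤ 'z') ∧ c ∉ seen then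
        pvBLoop rest (PySem.Set.add seen c) (out ++ [c])
      else
        pvBLoop rest seen out

def trovachiave_alt (chiave : String) : List String :=
  ((pvBLoop chiave.toList.reverse PySem.Set.empty []).reverse).map (fun c => String.ofList [c])

-- ===== PRECONDITION & SPEC =====
def Spec_trovachiave (chiave : String) (out : List String) : Prop := out = trovachiave_alt chiave
instance (chiave : String) (out : List String) : Decidable (Spec_trovachiave chiave out) := by unfold Spec_trovachiave; infer_instance

-- ===== CLAIM (what is proved, stated in full; the proofs are below) =====
def Claim_equal_trovachiave : Prop := ∀ (chiave : String), Dom_trovachiave chiave → Spec_trovachiave chiave (trovachiave chiave)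

-- ===== LEMMAS AND PROOFS =====

-- proof-only abbreviation: the net effect of one outer iteration of A on a duplicate-free accumulator
def pvStep (acc : List Char) (c : Char) : List Char :=
  if 'a' ≤ c ∧ c ≤ 'z' then acc.erase c ++ [c] else acc

-- duplicate-free list stays duplicate-free after appending a fresh element
lemma pvNodupSnoc {l : List Char} {c : Char} (hn : l.Nodup) (hc : c ∉ l) : (l ++ [c]).Nodup := by
  rw [List.nodup_append]
  refine ⟨hn, List.nodup_singleton c, ?_⟩
  intro a ha b hb
  rw [List.mem_singleton] at hb
  subst hb
  exact fun h => hc (h ▸ ha)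

-- the inner loop leaves a duplicate-free list unchanged
lemma pvDedup_id (k : Nat) : ∀ (l : List Char) (i : Nat), l.length ≤ i + k → l.Nodup →
    pvDedupLoop l i = l := by
  induction k with
  | zero =>
      intro l i h hn
      unfold pvDedupLoop
      rw [dif_neg (by omega)]
  | succ k ih =>
      intro l i h hn
      unfold pvDedupLoop
      split
      · next hi =>
          have hc : l.count l[i] ≤ 1 := List.nodup_iff_count_le_one.mp hn _
          rw [if_neg (by omega)]
          exact ih l (i + 1) (by omega) hn
      · rfl

-- the inner loop on (u ++ v ++ [c]) with one duplicate pair (c ∈ v) erases the earlier c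
lemma pvDedup_spec : ∀ (v u : List Char) (c : Char), (u ++ v).Nodup → c ∈ v →
    pvDedupLoop (u ++ v ++ [c]) u.length = u ++ v.erase c ++ [c] := by
  intro v
  induction v with
  | nil => intro u c _ hc; cases hc
  | cons x v' ih =>
      intro u c hn hc
      have hnu : x ∉ u := by
        intro hxu
        exact (List.disjoint_of_nodup_append hn) hxu (List.mem_cons_self)
      have hnv : x ∉ v' := by
        have := (List.nodup_append.mp hn).2.1
        exact (List.nodup_cons.mp this).1
      have hi : u.length < (u ++ (x :: v') ++ [c]).length := by
        simp [List.length_append]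
      have hget : (u ++ (x :: v') ++ [c])[u.length]'hi = x := by
        rw [List.getElem_append_left (by simp)]
        rw [List.getElem_append_right (by omega)]
        simp
      unfold pvDedupLoop
      rw [dif_pos hi, hget]
      by_cases hxc : x = c
      · subst hxc
        have hcount : (u ++ (x :: v') ++ [x]).count x > 1 := by
          simp [List.count_append, List.count_eq_zero_of_not_mem hnu,
                List.count_eq_zero_of_not_mem hnv]
        rw [if_pos hcount]
        have herase : (u ++ (x :: v') ++ [x]).erase x = u ++ v' ++ [x] := by
          simp [List.erase_append, hnu]
        rw [herase]
        have hnodup : (u ++ v' ++ [x]).Nodup := by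
          have h1 : (u ++ v').Nodup := by
            have hsub : List.Sublist (u ++ v') (u ++ x :: v') :=
              List.Sublist.append_left (List.sublist_cons_self x v') u
            exact hn.sublist hsub
          exact pvNodupSnoc h1 (by simp [hnu, hnv])
        rw [List.erase_cons_head]
        exact pvDedup_id (u ++ v' ++ [x]).length _ _ (by omega) hnodup
      · have hcx : c ∈ v' := by
          rcases List.mem_cons.mp hc with h | h
          · exact absurd h.symm hxc
          · exact h
        have hcount : ¬ (u ++ (x :: v') ++ [c]).count x > 1 := by
          simp [List.count_append, List.count_eq_zero_of_not_mem hnu,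
                List.count_eq_zero_of_not_mem hnv, hxc]
        rw [if_neg hcount]
        have hlist : u ++ (x :: v') ++ [c] = (u ++ [x]) ++ v' ++ [c] := by simp
        have hlen : u.length + 1 = (u ++ [x]).length := by simp
        rw [hlist, hlen]
        have hres := ih (u ++ [x]) c (by simpa using hn) hcx
        rw [hres]
        rw [List.erase_cons_tail (by simp [hxc])]
        simp

lemma pvStep_nodup (acc : List Char) (c : Char) (hn : acc.Nodup) : (pvStep acc c).Nodup := by
  unfold pvStep
  split
  · exact pvNodupSnoc (hn.erase c) hn.not_mem_erase
  · exact hn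

lemma pvStep_eq (acc : List Char) (c : Char) (hn : acc.Nodup) :
    pvDedupLoop (if 'a' ≤ c ∧ c ≤ 'z' then acc ++ [c] else acc) 0 = pvStep acc c := by
  unfold pvStep
  split
  · by_cases hm : c ∈ acc
    · have := pvDedup_spec acc [] c (by simpa using hn) hm
      simpa using this
    · rw [List.erase_of_not_mem hm]
      exact pvDedup_id (acc ++ [c]).length _ _ (by omega) (pvNodupSnoc hn hm)
  · exact pvDedup_id acc.length _ _ (by omega) hn

lemma pvALoop_eq_foldl : ∀ (cs : List Char) (acc : List Char), acc.Nodup →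
    pvALoop acc cs = cs.foldl pvStep acc := by
  intro cs
  induction cs with
  | nil => intro acc _; rfl
  | cons c rest ih =>
      intro acc hn
      show pvALoop (pvDedupLoop (if 'a' ≤ c ∧ c ≤ 'z' then acc ++ [c] else acc) 0) rest = _
      rw [pvStep_eq acc c hn, List.foldl_cons]
      exact ih _ (pvStep_nodup acc c hn)

lemma pvFold_nodup : ∀ (cs : List Char) (acc : List Char), acc.Nodup →
    (cs.foldl pvStep acc).Nodup := by
  intro cs
  induction cs with
  | nil => intro acc h; exact h
  | cons c rest ih => intro acc h; exact ih _ (pvStep_nodup acc c h)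

lemma pvBLoop_out : ∀ (cs : List Char) (seen : PySem.Set Char) (out : List Char),
    pvBLoop cs seen out = out ++ pvBLoop cs seen [] := by
  intro cs
  induction cs with
  | nil => intro seen out; simp [pvBLoop]
  | cons c rest ih =>
      intro seen out
      show (if ('a' ≤ c ∧ c ≤ 'z') ∧ c ∉ seen then _ else _) = _
      split
      · rw [ih _ (out ++ [c]), show pvBLoop (c :: rest) seen [] =
              pvBLoop rest (PySem.Set.add seen c) ([] ++ [c]) from by
            simp only [pvBLoop]; rw [if_pos ‹_›]]
        rw [ih _ ([] ++ [c])]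
        simp
      · rw [ih seen out, show pvBLoop (c :: rest) seen [] = pvBLoop rest seen [] from by
            simp only [pvBLoop]; rw [if_neg ‹_›]]

lemma pvB_filter : ∀ (l : List Char) (seen : List Char),
    (pvBLoop l.reverse seen []).reverse =
      (l.foldl pvStep []).filter (fun c => decide (c ∉ seen)) := by
  intro l
  induction l using List.reverseRecOn with
  | nil => intro seen; simp [pvBLoop]
  | append_singleton l' c ih =>
      intro seen
      have hnod : (l'.foldl pvStep []).Nodup := pvFold_nodup l' [] (by simp)
      rw [List.reverse_append]
      simp only [List.reverse_singleton, List.singleton_append]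
      rw [List.foldl_append, List.foldl_cons, List.foldl_nil]
      show (pvBLoop (c :: l'.reverse) seen []).reverse
            = (pvStep (l'.foldl pvStep []) c).filter (fun c => decide (c ∉ seen))
      have hstep : pvStep (l'.foldl pvStep []) c =
          if 'a' ≤ c ∧ c ≤ 'z' then (l'.foldl pvStep []).erase c ++ [c]
          else l'.foldl pvStep [] := rfl
      rw [hstep]
      simp only [pvBLoop]
      by_cases hL : 'a' ≤ c ∧ c ≤ 'z'
      · by_cases hs : c ∈ seen
        · rw [if_neg (by simp [hs]), if_pos hL]
          rw [ih seen]
          rw [List.filter_append]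
          have hc0 : ([c].filter (fun x => decide (x ∉ seen))) = [] := by simp [hs]
          rw [hc0, List.append_nil]
          rw [hnod.erase_eq_filter, List.filter_filter]
          apply List.filter_congr
          intro x _
          by_cases hxs : x ∈ seen
          · simp [hxs]
          · simp only [decide_not]
            have hxc : ¬ x = c := by rintro rfl; exact hxs hs
            simp [hxs, hxc]
        · rw [if_pos ⟨hL, hs⟩, if_pos hL]
          rw [pvBLoop_out _ _ ([] ++ [c])]
          simp only [List.nil_append, List.reverse_append, List.reverse_singleton]
          rw [ih (PySem.Set.add seen c)]
          rw [List.filter_append]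
          have hc1 : ([c].filter (fun x => decide (x ∉ seen))) = [c] := by simp [hs]
          rw [hc1]
          congr 1
          rw [hnod.erase_eq_filter, List.filter_filter]
          apply List.filter_congr
          intro x _
          by_cases hxc : x = c
          · subst hxc; simp [PySem.Set.mem_add]
          · by_cases hxs : x ∈ seen
            · simp [hxs, PySem.Set.mem_add]
            · simp [hxs, hxc, PySem.Set.mem_add]
      · rw [if_neg (by simp [hL]), if_neg hL]
        exact ih seen

-- ===== VERDICT (by name: the statement is the Claim_ definition above) =====
theorem trovachiave_spec : Claim_equal_trovachiave := by
  intro chiave _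
  unfold Spec_trovachiave trovachiave trovachiave_alt
  congr 1
  rw [pvALoop_eq_foldl chiave.toList [] (by simp)]
  have h := pvB_filter chiave.toList []
  simp only [List.not_mem_nil, not_false_iff, decide_true, List.filter_true] at h
  rw [show (PySem.Set.empty : PySem.Set Char) = ([] : List Char) from rfl]
  exact h.symm
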